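-- pv_equiv track=rewrite | github.com/magua-io/python-contest | USACO/week19-2022-US-Open/03-alchemy.py | get_metal
-- ===== SOURCE A (Python) =====
-- def get_metal(i, metals, recipes):
--     metal_to = i
--     metals_from = recipes.get(metal_to)
--     if metals_from == None:
--         return False
--     for metal in metals_from:
--         if metals[metal] > 0:
--             metals[metal] -= 1
--         else:
--             if not get_metal(metal, metals, recipes):
--                 return False
--     return True
-- ===== SOURCE B (Python) =====
-- def get_metal(i, metals, recipes):
--     todo = recipes.get(i)
--     if todo is None:
--         return False
--     stack = [iter(todo)]
--     while stack:
--         metal = next(stack[-1], None)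
--         if metal is None:
--             stack.pop()
--             continue
--         if metals[metal] > 0:
--             metals[metal] -= 1
--         else:
--             sub = recipes.get(metal)
--             if sub is None:
--                 return False
--             stack.append(iter(sub))
--     return True
-- ===== Notes on version B (the rewrite author's own statement) =====
-- stated objective: alternative
-- what changed: Replaces the recursive crafting search by an iterative DFS that keeps an explicit stack of iterators over recipe lists, draining each pushed recipe before resuming its parent so the consumption order, mutations and short-circuiting are identical without using the call stack.
-- outside the precondition, e.g. on get_metal(1, {2: 0}, {1: [2, 3]}): A returns False, B returns False; on get_metal(1, {2: 0, 3: 7}, {1: [2, 3], 2: [3], 9: [4]}): A returns True, B returns True; on get_metal(1, {2: 5}, {1: [2], 3: [3]}): A returns True, B returns True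
import Mathlib
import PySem

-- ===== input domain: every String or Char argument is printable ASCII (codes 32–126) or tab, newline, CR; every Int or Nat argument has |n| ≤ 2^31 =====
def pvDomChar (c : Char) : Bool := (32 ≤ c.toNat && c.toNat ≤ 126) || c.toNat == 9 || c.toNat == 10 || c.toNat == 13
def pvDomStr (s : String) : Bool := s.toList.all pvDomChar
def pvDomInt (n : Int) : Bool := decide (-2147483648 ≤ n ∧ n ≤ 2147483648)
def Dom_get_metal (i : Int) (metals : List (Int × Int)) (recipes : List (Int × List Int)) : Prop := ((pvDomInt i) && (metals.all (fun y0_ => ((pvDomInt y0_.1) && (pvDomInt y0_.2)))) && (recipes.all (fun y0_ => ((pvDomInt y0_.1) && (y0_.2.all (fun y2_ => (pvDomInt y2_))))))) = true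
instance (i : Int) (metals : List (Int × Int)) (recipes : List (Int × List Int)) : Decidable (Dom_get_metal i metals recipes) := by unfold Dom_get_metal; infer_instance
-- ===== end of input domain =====

-- B replaces A's recursion by an iterative DFS over an explicit stack of pending recipe lists
-- (same consumption order and result); both Pythons mutate `metals` identically in place —
-- the equivalence proved here is about the return value (the ports thread the dict as state).


-- ===== PORT A =====
-- A is recursive and mutates `metals`; the port threads the dict as state and returns
-- (result, final metals). Python's possible RecursionError / KeyError and non-termination are
-- rendered by a fuel counter: `none` = no normal return; Pre_ proves the fuel is never exhausted.
mutual
def getA (rd : PySem.Dict Int (List Int)) (f : Nat) (i : Int) (d : PySem.Dict Int Int) :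
    Option (Bool × PySem.Dict Int Int) :=
  match f with
  | 0 => none
  | f' + 1 =>
    -- metals_from = recipes.get(metal_to); if metals_from == None: return False
    match rd.get? i with
    | none => some (false, d)
    | some l => loopA rd f' l d
  termination_by (f, 0)

-- the `for metal in metals_from:` loop of A
def loopA (rd : PySem.Dict Int (List Int)) (f : Nat) (l : List Int) (d : PySem.Dict Int Int) :
    Option (Bool × PySem.Dict Int Int) :=
  match l with
  | [] => some (true, d)
  | m :: tl =>
    match d.get? m with
    | none => none                     -- KeyError: metals[metal]
    | some c =>
      if 0 < c then loopA rd f tl (d.insert m (c - 1))  -- metals[metal] -= 1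
      else
        match getA rd f m d with
        | none => none
        | some (false, d') => some (false, d')          -- if not get_metal(...): return False
        | some (true, d') => loopA rd f tl d'
  termination_by (f, l.length + 1)
end

def get_metal (i : Int) (metals : List (Int × Int)) (recipes : List (Int × List Int)) : Bool :=
  match getA (PySem.Dict.ofList recipes) (recipes.length + 2) i (PySem.Dict.ofList metals) with
  | some (b, _) => b
  | none => false

-- ===== PORT B =====
-- B's while-loop over the explicit stack; an iterator over a recipe list is its list of
-- remaining elements (next = head, advance = tail).  `none` = no normal return (fuel/KeyError).
def stepB (rd : PySem.Dict Int (List Int)) : Nat → List (List Int) → PySem.Dict Int Int →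
    Option (Bool × PySem.Dict Int Int)
  | 0, _, _ => none
  | _ + 1, [], d => some (true, d)                      -- while stack: … else return True
  | f + 1, [] :: rest, d => stepB rd f rest d           -- iterator exhausted: stack.pop()
  | f + 1, (m :: tl) :: rest, d =>                      -- metal = next(stack[-1], None)
    match d.get? m with
    | none => none                                      -- KeyError: metals[metal]
    | some c =>
      if 0 < c then stepB rd f (tl :: rest) (d.insert m (c - 1))
      else
        match rd.get? m with
        | none => some (false, d)                       -- sub is None: return False
        | some sub => stepB rd f (sub :: tl :: rest) d  -- stack.append(iter(sub))

def sumLens (recipes : List (Int × List Int)) : Nat := (recipes.map (fun p => p.2.length)).sum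

def fuelB (recipes : List (Int × List Int)) : Nat :=
  (sumLens recipes + 2) ^ (recipes.length + 2) + 2

def get_metal_alt (i : Int) (metals : List (Int × Int)) (recipes : List (Int × List Int)) : Bool :=
  match (PySem.Dict.ofList recipes : PySem.Dict Int (List Int)).get? i with
  | none => false                                       -- todo is None: return False
  | some l =>
    match stepB (PySem.Dict.ofList recipes) (fuelB recipes) [l] (PySem.Dict.ofList metals) with
    | some (b, _) => b
    | none => false

-- ===== PRECONDITION & SPEC =====
-- hasChain rd n k: there is a chain of n recipe-to-ingredient edges starting at k in which
-- every node is a recipe key (a graph property of the input, checked without running A)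
def hasChain (rd : PySem.Dict Int (List Int)) : Nat → Int → Bool
  | 0, k => (rd.get? k).isSome
  | n + 1, k =>
    match rd.get? k with
    | none => false
    | some l => l.any (fun m => hasChain rd n m)

-- Pre_ excludes exactly the two ways A can raise — a KeyError when a consumed ingredient is
-- missing from metals, and a RecursionError when the recipe graph has a cycle (a chain of
-- recipes.length key-edges means a repeated key, i.e. a cycle) — via checkable conditions on
-- the input; since A's raising depends on the run, these conservatively also exclude a few
-- inputs where A happens to return before reaching the missing key or the cycle (see cites).
def Pre_get_metal (i : Int) (metals : List (Int × Int)) (recipes : List (Int × List Int)) : Prop :=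
  (PySem.Dict.ofList recipes : PySem.Dict Int (List Int)).get? i = none ∨
  ((∀ p ∈ recipes, ∀ m ∈ p.2,
      ((PySem.Dict.ofList metals : PySem.Dict Int Int).get? m).isSome = true) ∧
   (∀ p ∈ recipes, ∀ m ∈ p.2,
      hasChain (PySem.Dict.ofList recipes) recipes.length m = false))
instance (i : Int) (metals : List (Int × Int)) (recipes : List (Int × List Int)) :
    Decidable (Pre_get_metal i metals recipes) := by unfold Pre_get_metal; infer_instance

def pvWitness_get_metal : Int × (List (Int × Int)) × (List (Int × List Int)) :=
  (1, [(2, 1), (3, 0)], [(1, [2, 3]), (3, [2])])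

def Spec_get_metal (i : Int) (metals : List (Int × Int)) (recipes : List (Int × List Int)) (out : Bool) : Prop := out = get_metal_alt i metals recipes
instance (i : Int) (metals : List (Int × Int)) (recipes : List (Int × List Int)) (out : Bool) : Decidable (Spec_get_metal i metals recipes out) := by unfold Spec_get_metal; infer_instance

-- ===== CLAIM (what is proved, stated in full; the proofs are below) =====
def Claim_equal_get_metal : Prop := ∀ (i : Int) (metals : List (Int × Int)) (recipes : List (Int × List Int)), Dom_get_metal i metals recipes → Pre_get_metal i metals recipes → Spec_get_metal i metals recipes (get_metal i metals recipes)

-- ===== LEMMAS AND PROOFS =====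

-- `metals` seen by the recursion: every recipe ingredient is a present key
def CovD (recipes : List (Int × List Int)) (d : PySem.Dict Int Int) : Prop :=
  ∀ p ∈ recipes, ∀ m ∈ p.2, (d.get? m).isSome = true

lemma loopA_nil (rd : PySem.Dict Int (List Int)) (f : Nat) (d : PySem.Dict Int Int) :
    loopA rd f [] d = some (true, d) := by rw [loopA]

lemma loopA_cons (rd : PySem.Dict Int (List Int)) (f : Nat) (m : Int) (tl : List Int)
    (d : PySem.Dict Int Int) :
    loopA rd f (m :: tl) d =
      match d.get? m with
      | none => none
      | some c =>
        if 0 < c then loopA rd f tl (d.insert m (c - 1))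
        else
          match getA rd f m d with
          | none => none
          | some (false, d') => some (false, d')
          | some (true, d') => loopA rd f tl d' := by rw [loopA]

lemma getA_succ (rd : PySem.Dict Int (List Int)) (f : Nat) (i : Int) (d : PySem.Dict Int Int) :
    getA rd (f + 1) i d =
      match rd.get? i with
      | none => some (false, d)
      | some l => loopA rd f l d := by rw [getA]

lemma getA_zero (rd : PySem.Dict Int (List Int)) (i : Int) (d : PySem.Dict Int Int) :
    getA rd 0 i d = none := by rw [getA]

lemma stepB_zero (rd : PySem.Dict Int (List Int)) (s : List (List Int)) (d : PySem.Dict Int Int) :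
    stepB rd 0 s d = none := by rw [stepB]

lemma stepB_nil (rd : PySem.Dict Int (List Int)) (f : Nat) (d : PySem.Dict Int Int) :
    stepB rd (f + 1) [] d = some (true, d) := by rw [stepB]

lemma stepB_pop (rd : PySem.Dict Int (List Int)) (f : Nat) (rest : List (List Int))
    (d : PySem.Dict Int Int) : stepB rd (f + 1) ([] :: rest) d = stepB rd f rest d := by rw [stepB]

lemma stepB_cons (rd : PySem.Dict Int (List Int)) (f : Nat) (m : Int) (tl : List Int)
    (rest : List (List Int)) (d : PySem.Dict Int Int) :
    stepB rd (f + 1) ((m :: tl) :: rest) d =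
      match d.get? m with
      | none => none
      | some c =>
        if 0 < c then stepB rd f (tl :: rest) (d.insert m (c - 1))
        else
          match rd.get? m with
          | none => some (false, d)
          | some sub => stepB rd f (sub :: tl :: rest) d := by rw [stepB]

lemma foldl_insert_get?_mem {ν : Type} (l : List (Int × ν)) (d : PySem.Dict Int ν) (k : Int)
    (v : ν) (h : (l.foldl (fun d p => d.insert p.1 p.2) d).get? k = some v) :
    (k, v) ∈ l ∨ d.get? k = some v := by
  induction l generalizing d with
  | nil => exact Or.inr h
  | cons p l ih =>
    rcases ih (d.insert p.1 p.2) h with h1 | h2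
    · exact Or.inl (List.mem_cons_of_mem _ h1)
    · rw [PySem.Dict.get?_insert] at h2
      by_cases hk : k = p.1
      · simp only [hk] at h2
        left
        have : p = (k, v) := by cases p; simp_all
        simp [this]
      · rw [if_neg hk] at h2
        exact Or.inr h2

lemma ofList_get?_mem {ν : Type} (l : List (Int × ν)) (k : Int) (v : ν)
    (h : (PySem.Dict.ofList l).get? k = some v) : (k, v) ∈ l := by
  have h' : (l.foldl (fun d p => d.insert p.1 p.2) PySem.Dict.empty).get? k = some v := h
  rcases foldl_insert_get?_mem l PySem.Dict.empty k v h' with h1 | h2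
  · exact h1
  · simp [PySem.Dict.get?_empty] at h2

lemma len_le_sumLens (recipes : List (Int × List Int)) (p : Int × List Int) (hp : p ∈ recipes) :
    p.2.length ≤ sumLens recipes := by
  exact List.single_le_sum (by simp) _ (List.mem_map_of_mem hp)

-- A's loop returns (no fuel exhaustion, no KeyError) whenever every ingredient is a metals key
-- and no element of `l` starts a chain of n key-edges; it preserves the key set of metals
lemma suffLoop (recipes : List (Int × List Int)) :
    ∀ n : Nat, ∀ l : List Int, ∀ d : PySem.Dict Int Int,
      CovD recipes d →
      (∀ m ∈ l, ∃ p ∈ recipes, m ∈ p.2) →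
      (∀ m ∈ l, hasChain (PySem.Dict.ofList recipes) n m = false) →
      ∀ f : Nat, n + 1 ≤ f →
      ∃ b d', loopA (PySem.Dict.ofList recipes) f l d = some (b, d') ∧
        ∀ x, (d'.get? x).isSome = (d.get? x).isSome := by
  intro n
  induction n using Nat.strong_induction_on with
  | _ n ih =>
    intro l
    induction l with
    | nil =>
      intro d _ _ _ f _
      exact ⟨true, d, loopA_nil _ _ _, fun x => rfl⟩
    | cons m tl ihtl =>
      intro d hCov hMem hCh f hf
      obtain ⟨p, hp, hmp⟩ := hMem m (by simp)
      have hmS : (d.get? m).isSome = true := hCov p hp m hmp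
      obtain ⟨c, hc⟩ : ∃ c, d.get? m = some c := Option.isSome_iff_exists.mp hmS
      have hMemtl : ∀ m' ∈ tl, ∃ p ∈ recipes, m' ∈ p.2 :=
        fun m' hm' => hMem m' (List.mem_cons_of_mem _ hm')
      have hChtl : ∀ m' ∈ tl, hasChain (PySem.Dict.ofList recipes) n m' = false :=
        fun m' hm' => hCh m' (List.mem_cons_of_mem _ hm')
      by_cases hpos : 0 < c
      · have hkeys : ∀ x, ((d.insert m (c - 1)).get? x).isSome = (d.get? x).isSome := by
          intro x
          rw [PySem.Dict.get?_insert]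
          by_cases hx : x = m
          · simp [hx, hmS]
          · simp [hx]
        have hCov' : CovD recipes (d.insert m (c - 1)) :=
          fun p hp m' hm' => by rw [hkeys]; exact hCov p hp m' hm'
        obtain ⟨b, d', hres, hk2⟩ := ihtl (d.insert m (c - 1)) hCov' hMemtl hChtl f hf
        refine ⟨b, d', ?_, fun x => (hk2 x).trans (hkeys x)⟩
        rw [loopA_cons, hc]
        simpa [hpos] using hres
      · obtain ⟨f', rfl⟩ : ∃ f', f = f' + 1 := ⟨f - 1, by omega⟩
        cases hsub : (PySem.Dict.ofList recipes : PySem.Dict Int (List Int)).get? m with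
        | none =>
          refine ⟨false, d, ?_, fun x => rfl⟩
          rw [loopA_cons, hc]
          simp only [hpos, if_false, getA_succ, hsub]
        | some sub =>
          have hchm := hCh m (by simp)
          obtain ⟨n'', rfl⟩ : ∃ n'', n = n'' + 1 := by
            cases n with
            | zero => simp [hasChain, hsub] at hchm
            | succ n'' => exact ⟨n'', rfl⟩
          have hChsub : ∀ m' ∈ sub, hasChain (PySem.Dict.ofList recipes) n'' m' = false := by
            intro m' hm'
            have : sub.any (fun m' => hasChain (PySem.Dict.ofList recipes) n'' m') = false := by
              simpa [hasChain, hsub] using hchm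
            rw [List.any_eq_false] at this
            simpa using this m' hm'
          have hsubmem : (m, sub) ∈ recipes := ofList_get?_mem _ _ _ hsub
          obtain ⟨bc, dc, hrc, hkc⟩ :=
            ih n'' (by omega) sub d hCov
              (fun m' hm' => ⟨(m, sub), hsubmem, hm'⟩) hChsub f' (by omega)
          cases bc with
          | false =>
            refine ⟨false, dc, ?_, hkc⟩
            rw [loopA_cons, hc]
            simp only [hpos, if_false, getA_succ, hsub, hrc]
          | true =>
            have hCovc : CovD recipes dc :=
              fun p hp m' hm' => by rw [hkc]; exact hCov p hp m' hm'
            obtain ⟨b, d', hres, hk2⟩ := ihtl dc hCovc hMemtl hChtl (f' + 1) hf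
            refine ⟨b, d', ?_, fun x => (hk2 x).trans (hkc x)⟩
            rw [loopA_cons, hc]
            simp only [hpos, if_false, getA_succ, hsub, hrc]
            exact hres

-- fuel monotonicity of B's loop
lemma stepB_mono (rd : PySem.Dict Int (List Int)) :
    ∀ f g : Nat, ∀ s : List (List Int), ∀ d : PySem.Dict Int Int,
      ∀ r : Bool × PySem.Dict Int Int,
      stepB rd f s d = some r → stepB rd (f + g) s d = some r := by
  intro f
  induction f with
  | zero =>
    intro g s d r h
    rw [stepB_zero] at h
    exact absurd h (by simp)
  | succ f ihf =>
    intro g s d r h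
    have hadd : f + 1 + g = (f + g) + 1 := by omega
    rw [hadd]
    cases s with
    | nil => rw [stepB_nil] at h; rw [stepB_nil]; exact h
    | cons top rest =>
      cases top with
      | nil =>
        rw [stepB_pop] at h
        rw [stepB_pop]
        exact ihf g rest d r h
      | cons m tl =>
        cases hgm : d.get? m with
        | none =>
          simp only [stepB_cons, hgm] at h
          exact absurd h (by simp)
        | some c =>
          by_cases hpos : 0 < c
          · simp only [stepB_cons, hgm, if_pos hpos] at h ⊢
            exact ihf g _ _ r h
          · cases hsub : rd.get? m with
            | none =>
              simp only [stepB_cons, hgm, if_neg hpos, hsub] at h ⊢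
              exact h
            | some sub =>
              simp only [stepB_cons, hgm, if_neg hpos, hsub] at h ⊢
              exact ihf g _ _ r h

-- simulation: one returning run of A's loop = a bounded number of B's steps on top of any stack
lemma simLoop (recipes : List (Int × List Int)) :
    ∀ f : Nat, ∀ l : List Int, ∀ d : PySem.Dict Int Int, ∀ b : Bool, ∀ d' : PySem.Dict Int Int,
      loopA (PySem.Dict.ofList recipes) f l d = some (b, d') →
      ∃ c : Nat, c ≤ (l.length + 1) * (sumLens recipes + 2) ^ f ∧
        ∀ g : Nat, ∀ stk : List (List Int),
          stepB (PySem.Dict.ofList recipes) (g + c) (l :: stk) d =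
            (if b then stepB (PySem.Dict.ofList recipes) g stk d' else some (false, d')) := by
  intro f
  induction f using Nat.strong_induction_on with
  | _ f ih =>
    intro l
    induction l with
    | nil =>
      intro d b d' hres
      rw [loopA_nil] at hres
      simp only [Option.some.injEq, Prod.mk.injEq] at hres
      obtain ⟨hb, hd⟩ := hres
      subst hb; subst hd
      refine ⟨1, ?_, ?_⟩
      · have hX : 1 ≤ (sumLens recipes + 2) ^ f := Nat.one_le_pow _ _ (by omega)
        simpa using hX
      · intro g stk
        rw [stepB_pop]
        simp
    | cons m tl ihtl =>
      intro d b d' hres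
      rw [loopA_cons] at hres
      cases hgm : d.get? m with
      | none => rw [hgm] at hres; simp at hres
      | some c =>
        rw [hgm] at hres
        by_cases hpos : 0 < c
        · simp [hpos] at hres
          obtain ⟨c1, hb1, h1⟩ := ihtl _ _ _ hres
          refine ⟨c1 + 1, ?_, ?_⟩
          · have hX : 1 ≤ (sumLens recipes + 2) ^ f := Nat.one_le_pow _ _ (by omega)
            simp only [List.length_cons]
            calc c1 + 1 ≤ (tl.length + 1) * (sumLens recipes + 2) ^ f + (sumLens recipes + 2) ^ f := by omega
              _ = (tl.length + 1 + 1) * (sumLens recipes + 2) ^ f := by ring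
          · intro g stk
            have hadd : g + (c1 + 1) = (g + c1) + 1 := by omega
            rw [hadd]
            simp only [stepB_cons, hgm, if_pos hpos]
            exact h1 g stk
        · simp [hpos] at hres
          rcases hgA : getA (PySem.Dict.ofList recipes) f m d with _ | ⟨bc, dc⟩
          · rw [hgA] at hres; simp at hres
          · rw [hgA] at hres
            obtain ⟨f', rfl⟩ : ∃ f', f = f' + 1 := by
              cases f with
              | zero => rw [getA_zero] at hgA; exact absurd hgA (by simp)
              | succ f' => exact ⟨f', rfl⟩
            rw [getA_succ] at hgA
            cases bc with
            | false =>
              simp at hres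
              obtain ⟨hb, hd⟩ := hres
              subst hb; subst hd
              cases hsub : (PySem.Dict.ofList recipes : PySem.Dict Int (List Int)).get? m with
              | none =>
                rw [hsub] at hgA
                simp only [Option.some.injEq, Prod.mk.injEq] at hgA
                obtain ⟨_, hdc⟩ := hgA
                subst hdc
                refine ⟨1, ?_, ?_⟩
                · have hX : 1 ≤ (sumLens recipes + 2) ^ (f' + 1) := Nat.one_le_pow _ _ (by omega)
                  have : (sumLens recipes + 2) ^ (f' + 1) ≤
                      ((m :: tl).length + 1) * (sumLens recipes + 2) ^ (f' + 1) :=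
                    Nat.le_mul_of_pos_left _ (by omega)
                  omega
                · intro g stk
                  simp only [stepB_cons, hgm, if_neg hpos, hsub]
                  simp
              | some sub =>
                rw [hsub] at hgA
                obtain ⟨cs, hbs, hs⟩ := ih f' (by omega) sub d false dc hgA
                have hsubmem : (m, sub) ∈ recipes := ofList_get?_mem _ _ _ hsub
                have hsublen : sub.length ≤ sumLens recipes := len_le_sumLens _ _ hsubmem
                refine ⟨cs + 1, ?_, ?_⟩
                · have hX : 1 ≤ (sumLens recipes + 2) ^ f' := Nat.one_le_pow _ _ (by omega)
                  calc cs + 1 ≤ (sub.length + 1) * (sumLens recipes + 2) ^ f' + 1 := by omega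
                    _ ≤ (sumLens recipes + 1) * (sumLens recipes + 2) ^ f' + 1 :=
                        Nat.add_le_add_right (Nat.mul_le_mul_right _ (by omega)) 1
                    _ ≤ (sumLens recipes + 1) * (sumLens recipes + 2) ^ f' +
                        (sumLens recipes + 2) ^ f' := by omega
                    _ = (sumLens recipes + 2) ^ (f' + 1) := by ring
                    _ ≤ ((m :: tl).length + 1) * (sumLens recipes + 2) ^ (f' + 1) :=
                        Nat.le_mul_of_pos_left _ (by omega)
                · intro g stk
                  have hadd : g + (cs + 1) = (g + cs) + 1 := by omega
                  rw [hadd]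
                  simp only [stepB_cons, hgm, if_neg hpos, hsub]
                  have := hs g (tl :: stk)
                  simp only [if_neg (by simp : ¬ (false = true))] at this
                  simpa using this
            | true =>
              simp at hres
              cases hsub : (PySem.Dict.ofList recipes : PySem.Dict Int (List Int)).get? m with
              | none =>
                rw [hsub] at hgA
                simp at hgA
              | some sub =>
                rw [hsub] at hgA
                obtain ⟨cs, hbs, hs⟩ := ih f' (by omega) sub d true dc hgA
                have hsubmem : (m, sub) ∈ recipes := ofList_get?_mem _ _ _ hsub
                have hsublen : sub.length ≤ sumLens recipes := len_le_sumLens _ _ hsubmem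
                obtain ⟨ct, hbt, ht⟩ := ihtl _ _ _ hres
                refine ⟨cs + ct + 1, ?_, ?_⟩
                · have hX : 1 ≤ (sumLens recipes + 2) ^ f' := Nat.one_le_pow _ _ (by omega)
                  have h1 : cs ≤ (sumLens recipes + 1) * (sumLens recipes + 2) ^ f' :=
                    le_trans hbs (Nat.mul_le_mul_right _ (by omega))
                  have h2 : (sumLens recipes + 1) * (sumLens recipes + 2) ^ f' +
                      (sumLens recipes + 2) ^ f' = (sumLens recipes + 2) ^ (f' + 1) := by ring
                  simp only [List.length_cons]
                  have h3 : ct ≤ (tl.length + 1) * (sumLens recipes + 2) ^ (f' + 1) := hbt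
                  have h4 : (tl.length + 1) * (sumLens recipes + 2) ^ (f' + 1) +
                      (sumLens recipes + 2) ^ (f' + 1) =
                      (tl.length + 1 + 1) * (sumLens recipes + 2) ^ (f' + 1) := by ring
                  omega
                · intro g stk
                  have hadd : g + (cs + ct + 1) = (g + ct + cs) + 1 := by omega
                  rw [hadd]
                  simp only [stepB_cons, hgm, if_neg hpos, hsub]
                  have h5 := hs (g + ct) (tl :: stk)
                  simp at h5
                  rw [h5]
                  exact ht g stk

-- ===== VERDICT (by name: the statement is the Claim_ definition above) =====
theorem get_metal_spec : Claim_equal_get_metal := by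
  intro i metals recipes _hDom hPre
  unfold Spec_get_metal get_metal get_metal_alt
  rw [show recipes.length + 2 = (recipes.length + 1) + 1 from rfl, getA_succ]
  cases hli : (PySem.Dict.ofList recipes : PySem.Dict Int (List Int)).get? i with
  | none => simp
  | some l =>
    rcases hPre with hnone | ⟨hCov, hNC⟩
    · rw [hli] at hnone
      exact absurd hnone (by simp)
    · have hmemi : (i, l) ∈ recipes := ofList_get?_mem _ _ _ hli
      obtain ⟨b, d', hA, _⟩ :=
        suffLoop recipes recipes.length l (PySem.Dict.ofList metals) hCov
          (fun m hm => ⟨(i, l), hmemi, hm⟩)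
          (fun m hm => hNC (i, l) hmemi m hm)
          (recipes.length + 1) (by omega)
      obtain ⟨c, hcB, hsim⟩ :=
        simLoop recipes (recipes.length + 1) l (PySem.Dict.ofList metals) b d' hA
      have hllen : l.length ≤ sumLens recipes := len_le_sumLens recipes (i, l) hmemi
      have hfuel : c + 1 ≤ fuelB recipes := by
        have hX : 1 ≤ (sumLens recipes + 2) ^ (recipes.length + 1) :=
          Nat.one_le_pow _ _ (by omega)
        have h1 : c ≤ (sumLens recipes + 1) * (sumLens recipes + 2) ^ (recipes.length + 1) :=
          le_trans hcB (Nat.mul_le_mul_right _ (by omega))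
        have h2 : (sumLens recipes + 1) * (sumLens recipes + 2) ^ (recipes.length + 1) +
            (sumLens recipes + 2) ^ (recipes.length + 1) =
            (sumLens recipes + 2) ^ (recipes.length + 2) := by ring
        unfold fuelB
        omega
      cases b with
      | true =>
        have h1 := hsim 1 []
        simp at h1
        have h2 : stepB (PySem.Dict.ofList recipes) 1 [] d' = some (true, d') :=
          stepB_nil _ 0 _
        rw [h2] at h1
        have h3 := stepB_mono (PySem.Dict.ofList recipes) (1 + c) (fuelB recipes - (1 + c))
          [l] (PySem.Dict.ofList metals) (true, d') h1
        have h4 : 1 + c + (fuelB recipes - (1 + c)) = fuelB recipes := by omega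
        rw [h4] at h3
        simp only [hA, h3]
      | false =>
        have h1 := hsim 0 []
        simp only [Bool.false_eq_true, if_false] at h1
        rw [Nat.zero_add] at h1
        have h3 := stepB_mono (PySem.Dict.ofList recipes) c (fuelB recipes - c)
          [l] (PySem.Dict.ofList metals) (false, d') h1
        have h4 : c + (fuelB recipes - c) = fuelB recipes := by omega
        rw [h4] at h3
        simp only [hA, h3]
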